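-- pv_equiv track=rewrite | github.com/Jepees/Split_Bill | SplitBill.py | int_to_Rp
-- ===== SOURCE A (Python) =====
-- def int_to_Rp(intr):
--     angka = list(str(int(intr)))
--     pnjg = len(angka)
--     cek = 0
--
--     for i in range(-1, -pnjg-1, -1):
--         if i != -pnjg and i%3 == 0:
--             angka.insert(i-cek,'.')
--             cek += 1
--     angka = "".join(angka)
--
--     return "Rp"+angka
-- ===== SOURCE B (Python) =====
-- def int_to_Rp(intr):
--     s = str(int(intr))
--     parts = []
--     i = len(s)
--     while i > 0:
--         parts.insert(0, s[max(0, i - 3):i])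
--         i -= 3
--     return "Rp" + ".".join(parts)
-- ===== Notes on version B (the rewrite author's own statement) =====
-- stated objective: simpler
-- what changed: B slices str(int(intr)) into three-character chunks from the right end and joins them with '.', replacing A's stateful loop that inserts a dot per affected digit position via negative-index modulo arithmetic and a shifting insertion offset.
import Mathlib
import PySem

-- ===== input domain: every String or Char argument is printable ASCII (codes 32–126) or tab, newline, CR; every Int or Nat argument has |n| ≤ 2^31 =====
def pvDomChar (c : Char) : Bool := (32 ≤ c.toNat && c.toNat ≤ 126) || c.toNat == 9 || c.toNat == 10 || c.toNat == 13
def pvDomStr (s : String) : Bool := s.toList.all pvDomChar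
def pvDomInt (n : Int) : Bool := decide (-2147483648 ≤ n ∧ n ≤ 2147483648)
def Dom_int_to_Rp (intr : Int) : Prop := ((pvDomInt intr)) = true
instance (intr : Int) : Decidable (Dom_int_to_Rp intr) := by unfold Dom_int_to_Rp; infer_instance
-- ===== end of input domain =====

-- B re-groups the digit string into three-character chunks from the right and joins them with '.',
-- instead of A's per-digit negative-index insertion loop; objective: simpler decomposition, same values
-- (including A's treatment of the '-' sign as an ordinary character).

-- ===== PORT A =====
-- the for-loop over range(-1, -pnjg-1, -1) with state (angka, cek), as a foldl
def pvGroupA (angka : List Char) : List Char :=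
  let pnjg : Int := PySem.List.len angka
  ((PySem.List.pyRange (-1) (-pnjg - 1) (-1)).foldl
    (fun (st : List Char × Int) i =>
      if i ≠ -pnjg ∧ PySem.Int.mod i 3 = 0 then
        (PySem.List.insert st.1 (i - st.2) '.', st.2 + 1)
      else st) (angka, 0)).1

def int_to_Rp (intr : Int) : String :=
  String.ofList ('R' :: 'p' :: pvGroupA (PySem.Int.toChars intr))

-- ===== PORT B =====
-- Source B's while-loop: i walks len(s), len(s)-3, …; each step prepends the chunk s[max(0,i-3):i]
def pvChunks (s : List Char) : Nat → List (List Char) → List (List Char)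
  | 0, acc => acc
  | 1, acc => PySem.List.slice s (some 0) (some 1) :: acc
  | 2, acc => PySem.List.slice s (some 0) (some 2) :: acc
  | (i+3), acc => pvChunks s i (PySem.List.slice s (some (i : Int)) (some ((i : Int) + 3)) :: acc)

def int_to_Rp_alt (intr : Int) : String :=
  let s := PySem.Int.toChars intr
  String.ofList ('R' :: 'p' :: PySem.Chars.join ['.'] (pvChunks s s.length []))

-- ===== PRECONDITION & SPEC =====
def Spec_int_to_Rp (intr : Int) (out : String) : Prop := out = int_to_Rp_alt intr
instance (intr : Int) (out : String) : Decidable (Spec_int_to_Rp intr out) := by unfold Spec_int_to_Rp; infer_instance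

-- ===== CLAIM (what is proved, stated in full; the proofs are below) =====
def Claim_equal_int_to_Rp : Prop := ∀ (intr : Int), Dom_int_to_Rp intr → Spec_int_to_Rp intr (int_to_Rp intr)

-- ===== LEMMAS AND PROOFS =====

-- str(n) for |n| ≤ 2^31 has at most 11 characters (10 digits plus a possible '-')
lemma pvLen (n : Int) (h1 : -2147483648 ≤ n) (h2 : n ≤ 2147483648) :
    (PySem.Int.toChars n).length ≤ 11 := by
  have hpow : (10 : Nat) ^ 10 = 10000000000 := by norm_num
  unfold PySem.Int.toChars
  split_ifs with hn
  · have hd : n.natAbs < 10 ^ 10 := by omega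
    have := Nat.toDigits_length 10 n.natAbs 10 (by norm_num) hd
    simp only [List.length_cons]
    omega
  · have hd : n.toNat < 10 ^ 10 := by omega
    have := Nat.toDigits_length 10 n.toNat 10 (by norm_num) hd
    omega

-- on every string of at most 11 characters, A's insertion loop produces exactly
-- B's right-to-left three-chunking joined with '.'
lemma pvKey : ∀ (s : List Char), s.length ≤ 11 →
    pvGroupA s = PySem.Chars.join ['.'] (pvChunks s s.length [])
  | [], _ => by
    have hr : PySem.List.pyRange (-1) (-1 : Int) (-1) = [] := by rfl
    simp only [pvGroupA, PySem.List.len_eq, List.length_nil]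
    norm_num [hr]
    rfl
  | [a], _ => by
    have hr : PySem.List.pyRange (-1) (-2 : Int) (-1) = [-1] := by rfl
    simp only [pvGroupA, PySem.List.len_eq, List.length_cons, List.length_nil]
    norm_num [hr]
    rfl
  | [a,b], _ => by
    have hr : PySem.List.pyRange (-1) (-3 : Int) (-1) = [-1,-2] := by rfl
    simp only [pvGroupA, PySem.List.len_eq, List.length_cons, List.length_nil]
    norm_num [hr]
    rfl
  | [a,b,c], _ => by
    have hr : PySem.List.pyRange (-1) (-4 : Int) (-1) = [-1,-2,-3] := by rfl
    simp only [pvGroupA, PySem.List.len_eq, List.length_cons, List.length_nil]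
    norm_num [hr]
    rfl
  | [a,b,c,d], _ => by
    have hr : PySem.List.pyRange (-1) (-5 : Int) (-1) = [-1,-2,-3,-4] := by rfl
    have h1 : PySem.List.insert [a,b,c,d] (-3) '.' = [a,'.',b,c,d] := by rfl
    simp only [pvGroupA, PySem.List.len_eq, List.length_cons, List.length_nil]
    norm_num [hr, h1]
    rfl
  | [a,b,c,d,e], _ => by
    have hr : PySem.List.pyRange (-1) (-6 : Int) (-1) = [-1,-2,-3,-4,-5] := by rfl
    have h1 : PySem.List.insert [a,b,c,d,e] (-3) '.' = [a,b,'.',c,d,e] := by rfl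
    simp only [pvGroupA, PySem.List.len_eq, List.length_cons, List.length_nil]
    norm_num [hr, h1]
    rfl
  | [a,b,c,d,e,f], _ => by
    have hr : PySem.List.pyRange (-1) (-7 : Int) (-1) = [-1,-2,-3,-4,-5,-6] := by rfl
    have h1 : PySem.List.insert [a,b,c,d,e,f] (-3) '.' = [a,b,c,'.',d,e,f] := by rfl
    simp only [pvGroupA, PySem.List.len_eq, List.length_cons, List.length_nil]
    norm_num [hr, h1]
    rfl
  | [a,b,c,d,e,f,g], _ => by
    have hr : PySem.List.pyRange (-1) (-8 : Int) (-1) = [-1,-2,-3,-4,-5,-6,-7] := by rfl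
    have h1 : PySem.List.insert [a,b,c,d,e,f,g] (-3) '.' = [a,b,c,d,'.',e,f,g] := by rfl
    have h2 : PySem.List.insert [a,b,c,d,'.',e,f,g] (-7) '.' = [a,'.',b,c,d,'.',e,f,g] := by rfl
    simp only [pvGroupA, PySem.List.len_eq, List.length_cons, List.length_nil]
    norm_num [hr, h1, h2]
    rfl
  | [a,b,c,d,e,f,g,h], _ => by
    have hr : PySem.List.pyRange (-1) (-9 : Int) (-1) = [-1,-2,-3,-4,-5,-6,-7,-8] := by rfl
    have h1 : PySem.List.insert [a,b,c,d,e,f,g,h] (-3) '.' = [a,b,c,d,e,'.',f,g,h] := by rfl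
    have h2 : PySem.List.insert [a,b,c,d,e,'.',f,g,h] (-7) '.' = [a,b,'.',c,d,e,'.',f,g,h] := by rfl
    simp only [pvGroupA, PySem.List.len_eq, List.length_cons, List.length_nil]
    norm_num [hr, h1, h2]
    rfl
  | [a,b,c,d,e,f,g,h,i], _ => by
    have hr : PySem.List.pyRange (-1) (-10 : Int) (-1) = [-1,-2,-3,-4,-5,-6,-7,-8,-9] := by rfl
    have h1 : PySem.List.insert [a,b,c,d,e,f,g,h,i] (-3) '.' = [a,b,c,d,e,f,'.',g,h,i] := by rfl
    have h2 : PySem.List.insert [a,b,c,d,e,f,'.',g,h,i] (-7) '.' = [a,b,c,'.',d,e,f,'.',g,h,i] := by rfl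
    simp only [pvGroupA, PySem.List.len_eq, List.length_cons, List.length_nil]
    norm_num [hr, h1, h2]
    rfl
  | [a,b,c,d,e,f,g,h,i,j], _ => by
    have hr : PySem.List.pyRange (-1) (-11 : Int) (-1) = [-1,-2,-3,-4,-5,-6,-7,-8,-9,-10] := by rfl
    have h1 : PySem.List.insert [a,b,c,d,e,f,g,h,i,j] (-3) '.' = [a,b,c,d,e,f,g,'.',h,i,j] := by rfl
    have h2 : PySem.List.insert [a,b,c,d,e,f,g,'.',h,i,j] (-7) '.' = [a,b,c,d,'.',e,f,g,'.',h,i,j] := by rfl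
    have h3 : PySem.List.insert [a,b,c,d,'.',e,f,g,'.',h,i,j] (-11) '.' = [a,'.',b,c,d,'.',e,f,g,'.',h,i,j] := by rfl
    simp only [pvGroupA, PySem.List.len_eq, List.length_cons, List.length_nil]
    norm_num [hr, h1, h2, h3]
    rfl
  | [a,b,c,d,e,f,g,h,i,j,k], _ => by
    have hr : PySem.List.pyRange (-1) (-12 : Int) (-1) = [-1,-2,-3,-4,-5,-6,-7,-8,-9,-10,-11] := by rfl
    have h1 : PySem.List.insert [a,b,c,d,e,f,g,h,i,j,k] (-3) '.' = [a,b,c,d,e,f,g,h,'.',i,j,k] := by rfl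
    have h2 : PySem.List.insert [a,b,c,d,e,f,g,h,'.',i,j,k] (-7) '.' = [a,b,c,d,e,'.',f,g,h,'.',i,j,k] := by rfl
    have h3 : PySem.List.insert [a,b,c,d,e,'.',f,g,h,'.',i,j,k] (-11) '.' = [a,b,'.',c,d,e,'.',f,g,h,'.',i,j,k] := by rfl
    simp only [pvGroupA, PySem.List.len_eq, List.length_cons, List.length_nil]
    norm_num [hr, h1, h2, h3]
    rfl
  | a::b::c::d::e::f::g::h::i::j::k::x::rest, hlen => by
    exfalso
    simp [List.length_cons] at hlen
    omega

-- ===== VERDICT (by name: the statement is the Claim_ definition above) =====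
theorem int_to_Rp_spec : Claim_equal_int_to_Rp := by
  intro intr hdom
  have hb : -2147483648 ≤ intr ∧ intr ≤ 2147483648 := by
    simpa [Dom_int_to_Rp, pvDomInt] using hdom
  unfold Spec_int_to_Rp int_to_Rp int_to_Rp_alt
  rw [pvKey _ (pvLen intr hb.1 hb.2)]
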